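-- pv_equiv track=rewrite | github.com/Jang-Jaewon/Algorithm-Study | 01_basic/017_이상한엘리베이터.py | solution
-- ===== SOURCE A (Python) =====
-- def solution(n):
--     res = 0
--     while True:
--         if n % 7 == 0:
--             res += n // 7
--             return res
--         n -= 3
--         res += 1
--         if n < 0:
--             return -1
-- ===== SOURCE B (Python) =====
-- def solution(n):
--     # k = smallest count of 3-subtractions making n a multiple of 7 (5 inverts 3 mod 7)
--     k = (5 * n) % 7
--     m = n - 3 * k
--     return -1 if m < 0 else k + m // 7
-- ===== Notes on version B (the rewrite author's own statement) =====
-- stated objective: faster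
-- what changed: Replaced the bounded subtract-3 while-loop with a closed-form modular computation: k = (5*n) % 7 (5 is the inverse of 3 mod 7) gives the number of subtractions directly, so B is O(1) arithmetic instead of O(n) iterations.
-- intended difference: For n < -7 divisible by 7 A skips its negativity check and returns the negative value n//7 (e.g. -2 at n=-14), while B returns -1, the intended 'unreachable' answer since no non-negative multiple of 7 can be reached from a negative n. — e.g. on solution(-14): A returns -2, B returns -1
import Mathlib
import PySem

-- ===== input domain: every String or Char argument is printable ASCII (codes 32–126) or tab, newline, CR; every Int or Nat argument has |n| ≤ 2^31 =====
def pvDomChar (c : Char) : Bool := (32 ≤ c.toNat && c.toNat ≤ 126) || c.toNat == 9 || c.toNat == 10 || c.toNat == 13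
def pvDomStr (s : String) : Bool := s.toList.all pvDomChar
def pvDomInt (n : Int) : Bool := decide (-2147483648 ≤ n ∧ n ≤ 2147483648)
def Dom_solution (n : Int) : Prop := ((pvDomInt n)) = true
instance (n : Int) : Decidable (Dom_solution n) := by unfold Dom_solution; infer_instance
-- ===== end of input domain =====

-- B replaces A's subtract-3 loop by one closed-form modular computation (O(1) vs O(n));
-- outside D_solution (n < -7 divisible by 7) the return values are proved equal.

-- ===== PORT A =====
-- the 'while True' loop: recursion happens only when n - 3 ≥ 0, so n.toNat decreases
def solLoop (n res : Int) : Int :=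
  if PySem.Int.mod n 7 = 0 then res + PySem.Int.floordiv n 7
  else
    if n - 3 < 0 then -1
    else solLoop (n - 3) (res + 1)
termination_by n.toNat
decreasing_by omega

def solution (n : Int) : Int := solLoop n 0

-- ===== PORT B =====
def solution_alt (n : Int) : Int :=
  let k := PySem.Int.mod (5 * n) 7
  let m := n - 3 * k
  if m < 0 then -1 else k + PySem.Int.floordiv m 7

-- ===== PRECONDITION & SPEC =====
-- For n < -7 divisible by 7, A skips its negativity check and returns the negative n//7
-- (e.g. -2 at n=-14); B returns -1, the intended answer since no floor is reachable.
def D_solution (n : Int) : Prop := n < -7 ∧ n % 7 = 0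
instance (n : Int) : Decidable (D_solution n) := by unfold D_solution; infer_instance

def Spec_solution (n : Int) (out : Int) : Prop := ¬ D_solution n → out = solution_alt n
instance (n : Int) (out : Int) : Decidable (Spec_solution n out) := by unfold Spec_solution; infer_instance

def pvDiffWitness_solution : Int := -14
def pvDiffWitnessOut_solution : Int × Int := (-2, -1)

-- ===== CLAIM (what is proved, stated in full; the proofs are below) =====
def Claim_unchanged_solution : Prop := ∀ (n : Int), Dom_solution n → Spec_solution n (solution n)
def Claim_changed_solution : Prop := Dom_solution (pvDiffWitness_solution) ∧ D_solution (pvDiffWitness_solution) ∧ solution (pvDiffWitness_solution) = pvDiffWitnessOut_solution.1 ∧ solution_alt (pvDiffWitness_solution) = pvDiffWitnessOut_solution.2 ∧ pvDiffWitnessOut_solution.1 ≠ pvDiffWitnessOut_solution.2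
def Claim_exact_solution : Prop := ∀ (n : Int), Dom_solution n → D_solution n → solution n ≠ solution_alt n

-- ===== LEMMAS AND PROOFS =====

-- arithmetic helpers relating (5*n) % 7 to n % 7 (omega needs the residue split)
theorem mod7_cases (q r : Int) (h0 : 0 ≤ r) (h7 : r < 7) (hne : r ≠ 0) :
    1 ≤ (5 * (7 * q + r)) % 7 ∧ (5 * (7 * q + r - 3)) % 7 = (5 * (7 * q + r)) % 7 - 1 := by
  have h : r = 1 ∨ r = 2 ∨ r = 3 ∨ r = 4 ∨ r = 5 ∨ r = 6 := by omega
  rcases h with h | h | h | h | h | h <;> subst h <;> constructor <;> omega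

theorem five_mod_ne (n : Int) (h : n % 7 ≠ 0) : 1 ≤ (5 * n) % 7 := by
  have h2 := mod7_cases (n / 7) (n % 7) (by omega) (by omega) h
  rw [show 7 * (n / 7) + n % 7 = n from by omega] at h2
  exact h2.1

theorem five_mod_shift (n : Int) (h : n % 7 ≠ 0) : (5 * (n - 3)) % 7 = (5 * n) % 7 - 1 := by
  have h2 := mod7_cases (n / 7) (n % 7) (by omega) (by omega) h
  rw [show 7 * (n / 7) + n % 7 = n from by omega] at h2
  exact h2.2

theorem five_mod_zero (n : Int) (h : n % 7 = 0) : (5 * n) % 7 = 0 := by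
  obtain ⟨q, hq⟩ : ∃ q, n = 7 * q := ⟨n / 7, by omega⟩
  subst hq; omega

-- For non-negative n (the only values the recursion visits) the loop equals the closed form.
theorem solLoop_closed (n res : Int) (hn : 0 ≤ n) :
    solLoop n res =
      (if n - 3 * PySem.Int.mod (5 * n) 7 < 0 then -1
       else res + PySem.Int.mod (5 * n) 7
            + PySem.Int.floordiv (n - 3 * PySem.Int.mod (5 * n) 7) 7) := by
  induction n, res using solLoop.induct with
  | case1 n res h =>
      rw [solLoop, if_pos h]
      rw [PySem.Int.mod_eq_emod_of_pos (by norm_num : (0:Int) < 7)] at h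
      simp only [PySem.Int.mod_eq_emod_of_pos (by norm_num : (0:Int) < 7)]
      rw [five_mod_zero n h, mul_zero, sub_zero, if_neg (by omega : ¬ n < 0)]
      ring
  | case2 n res h h3 =>
      rw [solLoop, if_neg h, if_pos h3]
      rw [PySem.Int.mod_eq_emod_of_pos (by norm_num : (0:Int) < 7)] at h
      simp only [PySem.Int.mod_eq_emod_of_pos (by norm_num : (0:Int) < 7)]
      have hk := five_mod_ne n h
      rw [if_pos (by omega : n - 3 * (5 * n % 7) < 0)]
  | case3 n res h h3 ih =>
      rw [solLoop, if_neg h, if_neg h3, ih (by omega)]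
      rw [PySem.Int.mod_eq_emod_of_pos (by norm_num : (0:Int) < 7)] at h
      simp only [PySem.Int.mod_eq_emod_of_pos (by norm_num : (0:Int) < 7)]
      have hk := five_mod_ne n h
      rw [five_mod_shift n h]
      rw [show n - 3 - 3 * (5 * n % 7 - 1) = n - 3 * (5 * n % 7) from by ring]
      split_ifs with hlt
      · rfl
      · ring_nf

-- ===== VERDICT (by name: the statement is the Claim_ definition above) =====
theorem solution_spec : Claim_unchanged_solution := by
  intro n _ hD
  unfold solution solution_alt D_solution at *
  rcases le_or_gt 0 n with hn | hn
  · rw [solLoop_closed n 0 hn]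
    simp only []
    split_ifs with h
    · rfl
    · ring
  · -- n < 0: both sides return -1, except n = -7 where both return -1 via different branches
    rw [solLoop]
    by_cases h0 : PySem.Int.mod n 7 = 0
    · rw [if_pos h0]
      rw [PySem.Int.mod_eq_emod_of_pos (by norm_num : (0:Int) < 7)] at h0
      have hn7 : n = -7 := by omega
      subst hn7; decide
    · rw [if_neg h0, if_pos (by omega : n - 3 < 0)]
      rw [PySem.Int.mod_eq_emod_of_pos (by norm_num : (0:Int) < 7)] at h0
      have hk := five_mod_ne n h0
      simp only [PySem.Int.mod_eq_emod_of_pos (by norm_num : (0:Int) < 7)]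
      rw [if_pos (by omega : n - 3 * (5 * n % 7) < 0)]

theorem solution_changed : Claim_changed_solution := by
  unfold Claim_changed_solution pvDiffWitness_solution pvDiffWitnessOut_solution
  refine ⟨by decide, by decide, ?_, by decide, by decide⟩
  show solution (-14) = -2
  unfold solution; rw [solLoop]; decide

theorem solution_tight : Claim_exact_solution := by
  intro n _ hD
  obtain ⟨hlt, hdvd⟩ := hD
  unfold solution solution_alt
  have h0 : PySem.Int.mod n 7 = 0 := by
    rw [PySem.Int.mod_eq_emod_of_pos (by norm_num : (0:Int) < 7)]; exact hdvd
  have hk : PySem.Int.mod (5 * n) 7 = 0 := by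
    rw [PySem.Int.mod_eq_emod_of_pos (by norm_num : (0:Int) < 7)]
    exact five_mod_zero n hdvd
  rw [solLoop, if_pos h0]
  simp only [hk, mul_zero, sub_zero, if_pos (by omega : n < 0)]
  rw [PySem.Int.floordiv_eq_ediv_of_pos (by norm_num : (0:Int) < 7)]
  omega
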